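-- pv_equiv track=rewrite | github.com/BrentGG/AdventOfCode2023 | day5/main.py | doMapping
-- ===== SOURCE A (Python) =====
-- def doMapping(maps, map_idx, start, end):
--     if map_idx >= len(maps):
--         return start
--     for j in range(len(maps[map_idx])):
--         dest_start = maps[map_idx][j][0]
--         dest_end = dest_start + maps[map_idx][j][2] - 1
--         src_start = maps[map_idx][j][1]
--         src_end = src_start + maps[map_idx][j][2] - 1
--         if src_start <= start <= src_end:
--             if end <= src_end:
--                 new_start = dest_start + (start - src_start)
--                 new_end = dest_start + (end - src_start)
--                 return doMapping(maps, map_idx + 1, new_start, new_end)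
--             else:
--                 new_start_1 = dest_start + (start - src_start)
--                 new_end_1 = dest_end
--                 result_1 = doMapping(maps, map_idx + 1, new_start_1, new_end_1)
--                 new_start_2 = src_end + 1
--                 new_end_2 = end
--                 result_2 = doMapping(maps, map_idx, new_start_2, new_end_2)
--                 return min([result_1, result_2])
--     return doMapping(maps, map_idx + 1, start, end)
-- ===== SOURCE B (Python) =====
-- def _split(layer, s, e):
--     # map one segment [s, e] through one layer, left to right;
--     # returns the resulting segments at the next layer
--     out = []
--     while True:
--         ent = next((x for x in layer if x[1] <= s <= x[1] + x[2] - 1), None)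
--         if ent is None:
--             out.append((s, e))
--             return out
--         d, src, n = ent[0], ent[1], ent[2]
--         if e <= src + n - 1:
--             out.append((d + (s - src), d + (e - src)))
--             return out
--         out.append((d + (s - src), d + n - 1))
--         s = src + n
--
--
-- def doMapping(maps, map_idx, start, end):
--     segs = [(start, end)]
--     i = map_idx
--     while i < len(maps):
--         layer = maps[i]
--         segs = [seg for p in segs for seg in _split(layer, p[0], p[1])]
--         i += 1
--     return min(s for s, e in segs)
-- ===== Notes on version B (the rewrite author's own statement) =====
-- stated objective: alternative
-- what changed: A maps one range depth-first by recursion, taking the min of the two subtree results at every split; B sweeps breadth-first layer by layer over a worklist of segments, splitting each segment into its next-layer pieces, and takes a single min over the final segments' starts.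
-- outside the precondition, e.g. on doMapping([[[5, 3, 4], [7]]], 0, 3, 4): A returns 5, B returns 5
import Mathlib
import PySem

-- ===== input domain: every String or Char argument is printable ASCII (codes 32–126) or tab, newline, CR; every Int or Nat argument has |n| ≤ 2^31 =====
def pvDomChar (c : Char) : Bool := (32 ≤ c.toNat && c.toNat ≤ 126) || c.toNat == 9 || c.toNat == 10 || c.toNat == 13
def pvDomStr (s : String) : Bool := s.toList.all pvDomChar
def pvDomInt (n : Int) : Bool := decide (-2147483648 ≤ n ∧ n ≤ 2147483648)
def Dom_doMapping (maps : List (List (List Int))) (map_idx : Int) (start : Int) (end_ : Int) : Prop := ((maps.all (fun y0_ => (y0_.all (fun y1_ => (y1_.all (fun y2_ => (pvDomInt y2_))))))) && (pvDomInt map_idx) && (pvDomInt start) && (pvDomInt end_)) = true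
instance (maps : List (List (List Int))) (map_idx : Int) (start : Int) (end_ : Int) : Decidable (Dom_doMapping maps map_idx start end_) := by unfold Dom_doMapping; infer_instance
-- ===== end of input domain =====

-- B replaces A's depth-first recursion (min over two subtree results) by a breadth-first
-- layer-by-layer sweep over a list of segments, taking one min at the end (objective: alternative).


-- ===== PORT A =====
-- shared tiny helpers: the entry-containment test 'src_start <= start <= src_end'
-- (both Pythons scan for the first entry whose source range contains the segment start)
def entPred (s : Int) (ent : List Int) : Bool :=
  decide (PySem.List.pyGetD ent 1 0 ≤ s ∧ s ≤ PySem.List.pyGetD ent 1 0 + PySem.List.pyGetD ent 2 0 - 1)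

-- upper bound 'src_start + length' over a list of entries; used only for termination measures
def entKey (ent : List Int) : Int := PySem.List.pyGetD ent 1 0 + PySem.List.pyGetD ent 2 0

def maxKey (l : List (List Int)) : Int := l.foldl (fun a ent => max a (entKey ent)) 0

theorem le_maxKey {l : List (List Int)} {ent : List Int} (h : ent ∈ l) : entKey ent ≤ maxKey l := by
  have := (PySem.List.le_foldl_max (l.map entKey) 0).2
  have hmem : entKey ent ∈ l.map entKey := List.mem_map_of_mem h
  have hfold : l.foldl (fun a e => max a (entKey e)) 0 = (l.map entKey).foldl max 0 := by
    rw [List.foldl_map]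
  rw [maxKey, hfold]
  exact this _ hmem

theorem layer_key_le {maps : List (List (List Int))} {i : Int} {ent : List Int}
    (h : ent ∈ PySem.List.pyGetD maps i []) : entKey ent ≤ maxKey maps.flatten := by
  rcases hg : PySem.List.pyGet? maps i with _ | m
  · rw [PySem.List.pyGetD, hg] at h; simp at h
  · have hEq : PySem.List.pyGetD maps i [] = m := by rw [PySem.List.pyGetD, hg]; rfl
    rw [hEq] at h
    have hm : m ∈ maps := PySem.List.mem_of_pyGet?_eq_some _ hg
    exact le_maxKey (List.mem_flatten.2 ⟨m, hm, h⟩)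

theorem entPred_bounds {s : Int} {ent : List Int} (h : entPred s ent = true) :
    PySem.List.pyGetD ent 1 0 ≤ s ∧ s < entKey ent := by
  have := of_decide_eq_true h
  unfold entKey; omega

-- literal port of A: recursive depth-first mapping, min of the two subtree results on a split
def doMapping (maps : List (List (List Int))) (map_idx : Int) (start : Int) (end_ : Int) : Int :=
  if _h : map_idx ≥ (maps.length : Int) then start
  else
    match hf : (PySem.List.pyGetD maps map_idx []).find? (entPred start) with
    | none => doMapping maps (map_idx + 1) start end_
    | some ent =>
      if end_ ≤ PySem.List.pyGetD ent 1 0 + PySem.List.pyGetD ent 2 0 - 1 then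
        doMapping maps (map_idx + 1)
          (PySem.List.pyGetD ent 0 0 + (start - PySem.List.pyGetD ent 1 0))
          (PySem.List.pyGetD ent 0 0 + (end_ - PySem.List.pyGetD ent 1 0))
      else
        min (doMapping maps (map_idx + 1)
              (PySem.List.pyGetD ent 0 0 + (start - PySem.List.pyGetD ent 1 0))
              (PySem.List.pyGetD ent 0 0 + PySem.List.pyGetD ent 2 0 - 1))
            (doMapping maps map_idx
              (PySem.List.pyGetD ent 1 0 + PySem.List.pyGetD ent 2 0) end_)
termination_by ((maps.length - map_idx).toNat, (maxKey maps.flatten - start).toNat)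
decreasing_by
  · exact Prod.Lex.left _ _ (by omega)
  · exact Prod.Lex.left _ _ (by omega)
  · exact Prod.Lex.left _ _ (by omega)
  · apply Prod.Lex.right
    have hb := entPred_bounds (List.find?_some hf)
    have hk := layer_key_le (List.mem_of_find?_eq_some hf)
    unfold entKey at hb hk; omega

-- ===== PORT B =====
-- map one segment [s, e] through one layer, left to right (port of _split in Source B)
def splitSeg (layer : List (List Int)) (s e : Int) : List (Int × Int) :=
  match _hf : layer.find? (entPred s) with
  | none => [(s, e)]
  | some ent =>
    if e ≤ PySem.List.pyGetD ent 1 0 + PySem.List.pyGetD ent 2 0 - 1 then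
      [(PySem.List.pyGetD ent 0 0 + (s - PySem.List.pyGetD ent 1 0),
        PySem.List.pyGetD ent 0 0 + (e - PySem.List.pyGetD ent 1 0))]
    else
      (PySem.List.pyGetD ent 0 0 + (s - PySem.List.pyGetD ent 1 0),
       PySem.List.pyGetD ent 0 0 + PySem.List.pyGetD ent 2 0 - 1) ::
        splitSeg layer (PySem.List.pyGetD ent 1 0 + PySem.List.pyGetD ent 2 0) e
termination_by (maxKey layer - s).toNat
decreasing_by
  have hb := entPred_bounds (List.find?_some _hf)
  have hk := le_maxKey (List.mem_of_find?_eq_some _hf)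
  unfold entKey at hb hk; omega

-- the layer loop of doMapping in Source B
def runLayers (maps : List (List (List Int))) (i : Int) (segs : List (Int × Int)) : List (Int × Int) :=
  if i ≥ (maps.length : Int) then segs
  else runLayers maps (i + 1) (segs.flatMap (fun p => splitSeg (PySem.List.pyGetD maps i []) p.1 p.2))
termination_by (maps.length - i).toNat
decreasing_by omega

def doMapping_alt (maps : List (List (List Int))) (map_idx : Int) (start : Int) (end_ : Int) : Int :=
  match runLayers maps map_idx [(start, end_)] with
  | [] => 0   -- unreachable: runLayers never returns [] from a nonempty worklist
  | p :: rest => rest.foldl (fun a q => min a q.1) p.1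

-- ===== PRECONDITION & SPEC =====
-- Pre_ excludes exactly the inputs on which the Python can raise IndexError: map_idx below
-- -len(maps) (while < len(maps)), and entries with fewer than 3 fields in a layer the run can
-- visit (layers from map_idx on; all layers when map_idx is negative, since the run wraps and
-- then sweeps from 0).  When such a short entry sits behind the first matching entry the Python
-- happens not to read it and still returns; both programs agree there (see cites).
def Pre_doMapping (maps : List (List (List Int))) (map_idx : Int) (start : Int) (end_ : Int) : Prop :=
  (maps.length : Int) ≤ map_idx ∨
  (0 ≤ map_idx ∧ ∀ m ∈ maps.drop map_idx.toNat, ∀ ent ∈ m, 3 ≤ ent.length) ∨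
  (-(maps.length : Int) ≤ map_idx ∧ map_idx < 0 ∧ ∀ m ∈ maps, ∀ ent ∈ m, 3 ≤ ent.length)
instance (maps : List (List (List Int))) (map_idx : Int) (start : Int) (end_ : Int) : Decidable (Pre_doMapping maps map_idx start end_) := by unfold Pre_doMapping; infer_instance

def pvWitness_doMapping : List (List (List Int)) × Int × Int × Int :=
  ([[[50, 98, 2], [52, 50, 48]], [[0, 15, 37]]], 0, 55, 120)

def Spec_doMapping (maps : List (List (List Int))) (map_idx : Int) (start : Int) (end_ : Int) (out : Int) : Prop := out = doMapping_alt maps map_idx start end_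
instance (maps : List (List (List Int))) (map_idx : Int) (start : Int) (end_ : Int) (out : Int) : Decidable (Spec_doMapping maps map_idx start end_ out) := by unfold Spec_doMapping; infer_instance

-- ===== CLAIM (what is proved, stated in full; the proofs are below) =====
def Claim_equal_doMapping : Prop := ∀ (maps : List (List (List Int))) (map_idx : Int) (start : Int) (end_ : Int), Dom_doMapping maps map_idx start end_ → Pre_doMapping maps map_idx start end_ → Spec_doMapping maps map_idx start end_ (doMapping maps map_idx start end_)

-- ===== LEMMAS AND PROOFS =====
-- min over the first components, as doMapping_alt computes it
def minStarts (l : List (Int × Int)) : Int :=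
  match l with
  | [] => 0
  | p :: rest => rest.foldl (fun a q => min a q.1) p.1

theorem foldl_min_hoist (l : List (Int × Int)) (a b : Int) :
    min a (l.foldl (fun x q => min x q.1) b) = l.foldl (fun x q => min x q.1) (min a b) := by
  induction l generalizing a b with
  | nil => simp
  | cons c cs ih => simp only [List.foldl_cons]; rw [ih, min_assoc]

theorem minStarts_cons (p : Int × Int) (l : List (Int × Int)) (h : l ≠ []) :
    minStarts (p :: l) = min p.1 (minStarts l) := by
  cases l with
  | nil => exact absurd rfl h
  | cons q qs => simp only [minStarts, List.foldl_cons]; rw [foldl_min_hoist]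

theorem minStarts_append (l1 l2 : List (Int × Int)) (h1 : l1 ≠ []) (h2 : l2 ≠ []) :
    minStarts (l1 ++ l2) = min (minStarts l1) (minStarts l2) := by
  induction l1 with
  | nil => exact absurd rfl h1
  | cons p ps ih =>
    cases ps with
    | nil =>
      cases l2 with
      | nil => exact absurd rfl h2
      | cons q qs =>
        simp only [minStarts, List.cons_append, List.nil_append, List.foldl_cons,
          List.foldl_nil]
        rw [foldl_min_hoist]
    | cons r rs =>
      rw [List.cons_append, minStarts_cons p ((r :: rs) ++ l2) (by simp),
          minStarts_cons p (r :: rs) (by simp), ih (by simp) , min_assoc]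

theorem splitSeg_ne_nil (layer : List (List Int)) (s e : Int) : splitSeg layer s e ≠ [] := by
  rw [splitSeg.eq_def]
  split
  · simp
  · split <;> simp

theorem flatMap_split_ne_nil (layer : List (List Int)) (segs : List (Int × Int)) (h : segs ≠ []) :
    segs.flatMap (fun p => splitSeg layer p.1 p.2) ≠ [] := by
  cases segs with
  | nil => exact absurd rfl h
  | cons p ps =>
    simp only [List.flatMap_cons, ne_eq, List.append_eq_nil_iff, not_and]
    intro hc; exact absurd hc (splitSeg_ne_nil _ _ _)

-- one segment through one layer: A's value is the min of A at the next layer over the split pieces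
theorem doMapping_split (maps : List (List (List Int))) (i : Int) (hlt : ¬ i ≥ (maps.length : Int))
    (s e : Int) :
    doMapping maps i s e =
      minStarts ((splitSeg (PySem.List.pyGetD maps i []) s e).map
        (fun p => (doMapping maps (i + 1) p.1 p.2, p.2))) := by
  fun_induction splitSeg (PySem.List.pyGetD maps i []) s e with
  | case1 s hf =>
    rw [doMapping.eq_def, dif_neg hlt]
    split
    · simp only [List.map_cons, List.map_nil, minStarts, List.foldl_nil]
    · next ent heq => rw [hf] at heq; exact absurd heq (by simp)
  | case2 s ent hf hle =>
    rw [doMapping.eq_def, dif_neg hlt]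
    split
    · next heq => rw [hf] at heq; exact absurd heq (by simp)
    · next ent' heq =>
      rw [hf] at heq
      injection heq with heq; subst heq
      rw [if_pos hle]
      simp only [List.map_cons, List.map_nil, minStarts, List.foldl_nil]
  | case3 s ent hf hle ih =>
    rw [doMapping.eq_def, dif_neg hlt]
    split
    · next heq => rw [hf] at heq; exact absurd heq (by simp)
    · next ent' heq =>
      rw [hf] at heq
      injection heq with heq; subst heq
      rw [if_neg hle]
      simp only [List.map_cons]
      rw [minStarts_cons _ _ (by
        intro hc
        exact splitSeg_ne_nil _ _ _ (List.map_eq_nil_iff.1 hc)), ← ih]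

-- one whole worklist through one layer
theorem layer_min (maps : List (List (List Int))) (i : Int) (hlt : ¬ i ≥ (maps.length : Int))
    (segs : List (Int × Int)) (h : segs ≠ []) :
    minStarts ((segs.flatMap (fun p => splitSeg (PySem.List.pyGetD maps i []) p.1 p.2)).map
        (fun p => (doMapping maps (i + 1) p.1 p.2, p.2))) =
      minStarts (segs.map (fun p => (doMapping maps i p.1 p.2, p.2))) := by
  induction segs with
  | nil => exact absurd rfl h
  | cons p ps ihs =>
    cases ps with
    | nil =>
      simp only [List.flatMap_cons, List.flatMap_nil, List.append_nil, List.map_cons,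
        List.map_nil]
      rw [doMapping_split maps i hlt p.1 p.2]
      simp only [minStarts, List.foldl_nil]
    | cons q qs =>
      simp only [List.flatMap_cons, List.map_append, List.map_cons] at ihs ⊢
      rw [minStarts_append _ _ (by
            intro hc
            exact splitSeg_ne_nil _ _ _ (List.map_eq_nil_iff.1 hc))
          (by
            have hne := flatMap_split_ne_nil (PySem.List.pyGetD maps i []) (q :: qs) (by simp)
            simp only [List.flatMap_cons] at hne ⊢
            intro hc
            rcases List.append_eq_nil_iff.1 hc with ⟨hc1, _⟩
            exact splitSeg_ne_nil _ _ _ (List.map_eq_nil_iff.1 hc1)),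
        minStarts_cons _ _ (by simp),
        ← doMapping_split maps i hlt p.1 p.2, ihs (by simp)]

-- the layer loop computes the same min as folding A over the worklist
theorem runLayers_min (maps : List (List (List Int))) (n : Nat) (i : Int)
    (segs : List (Int × Int)) (hn : ((maps.length : Int) - i).toNat ≤ n) (h : segs ≠ []) :
    minStarts (runLayers maps i segs) =
      minStarts (segs.map (fun p => (doMapping maps i p.1 p.2, p.2))) := by
  induction n generalizing i segs with
  | zero =>
    have hge : i ≥ (maps.length : Int) := by omega
    rw [runLayers.eq_def, if_pos hge]
    congr 1
    apply List.ext_getElem (by simp)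
    intro k h1 h2
    simp only [List.getElem_map]
    rw [doMapping.eq_def, dif_pos hge]
  | succ m ihn =>
    by_cases hge : i ≥ (maps.length : Int)
    · rw [runLayers.eq_def, if_pos hge]
      congr 1
      apply List.ext_getElem (by simp)
      intro k h1 h2
      simp only [List.getElem_map]
      rw [doMapping.eq_def, dif_pos hge]
    · rw [runLayers.eq_def, if_neg hge]
      rw [ihn (i + 1) _ (by omega) (flatMap_split_ne_nil _ _ h)]
      exact layer_min maps i hge segs h

-- ===== VERDICT (by name: the statement is the Claim_ definition above) =====
theorem doMapping_spec : Claim_equal_doMapping := by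
  intro maps map_idx start end_ _ _
  unfold Spec_doMapping
  show doMapping maps map_idx start end_ = minStarts (runLayers maps map_idx [(start, end_)])
  rw [runLayers_min maps ((maps.length : Int) - map_idx).toNat map_idx [(start, end_)]
    (le_refl _) (by simp)]
  rfl
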